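-- pv_equiv track=rewrite | github.com/rivar0107/kb-sync | scripts/sync_engine.py | _insert_link_into_section
-- ===== SOURCE A (Python) =====
-- def _insert_link_into_section(content: str, section_title: str, link_line: str) -> str:
--     """在 Markdown 的指定 section 中插入一行链接；如 section 不存在则在末尾追加。"""
--     lines = content.split("\n")
--     section_start = None
--     for i, line in enumerate(lines):
--         if line.strip().startswith(f"## {section_title}"):
--             section_start = i
--             break
--
--     if section_start is None:
--         return content + f"\n\n## {section_title}\n{link_line}\n"
--
--     # 找到 section 结束位置（下一个 ## 开头或文件末尾）
--     section_end = len(lines)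
--     for i in range(section_start + 1, len(lines)):
--         if lines[i].strip().startswith("## "):
--             section_end = i
--             break
--
--     # 检查是否已存在相同链接
--     for line in lines[section_start:section_end]:
--         if link_line in line:
--             return content
--
--     lines.insert(section_end, link_line)
--     return "\n".join(lines)
-- ===== SOURCE B (Python) =====
-- def _insert_link_into_section(content: str, section_title: str, link_line: str) -> str:
--     """Parse the document into '## '-header-delimited blocks, edit the matching
--     block (append link_line unless already present), then flatten the blocks."""
--     lines = content.split("\n")
--     blocks = []
--     cur = []
--     for line in lines:
--         if line.strip().startswith("## "):
--             blocks.append(cur)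
--             cur = [line]
--         else:
--             cur.append(line)
--     blocks.append(cur)
--
--     target = "## " + section_title
--     for k, blk in enumerate(blocks):
--         if blk and blk[0].strip().startswith(target):
--             if any(link_line in ln for ln in blk):
--                 return content
--             flat = [ln for b in blocks[:k] for ln in b] + blk + [link_line] \
--                  + [ln for b in blocks[k + 1:] for ln in b]
--             return "\n".join(flat)
--     return content + "\n\n" + target + "\n" + link_line + "\n"
-- ===== Notes on version B (the rewrite author's own statement) =====
-- stated objective: alternative
-- what changed: B parses the whole document once into a list of '## '-header-delimited blocks (a different data structure), then searches, duplicate-checks and edits a single block and flattens, instead of A's index scans over the flat line list plus an in-place insert.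
import Mathlib
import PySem

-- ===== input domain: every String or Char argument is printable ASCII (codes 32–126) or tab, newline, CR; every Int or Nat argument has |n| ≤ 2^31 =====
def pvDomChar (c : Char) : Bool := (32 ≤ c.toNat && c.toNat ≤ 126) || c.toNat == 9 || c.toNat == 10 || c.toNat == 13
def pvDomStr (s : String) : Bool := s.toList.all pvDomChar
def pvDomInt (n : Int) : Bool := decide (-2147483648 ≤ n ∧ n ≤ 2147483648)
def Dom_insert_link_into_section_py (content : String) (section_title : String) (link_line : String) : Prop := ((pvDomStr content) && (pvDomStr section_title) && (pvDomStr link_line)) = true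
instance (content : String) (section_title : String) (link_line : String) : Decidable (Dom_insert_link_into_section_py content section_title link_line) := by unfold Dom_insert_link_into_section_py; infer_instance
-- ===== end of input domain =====

-- B parses the document once into '## '-header-delimited blocks, edits the matching block and
-- flattens, instead of A's index scans over the flat line list; same cost, different structure.

-- ===== PORT A =====
-- shared transliteration of A's two "for … : if p(line): …; break" index searches
def pvFindIdxFrom (p : String → Bool) : List String → Nat → Option Nat
  | [], _ => none
  | l :: ls, i => if p l then some i else pvFindIdxFrom p ls (i + 1)

-- content.split("\n"): Chars.splitOn is the sep ≠ "" form of str.split, exact here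
def pvSplitLines (content : String) : List String :=
  (PySem.Chars.splitOn content.toList ['\n']).map (fun cs => String.ofList cs)

def insert_link_into_section_py (content : String) (section_title : String) (link_line : String) : String :=
  let lines := pvSplitLines content
  match pvFindIdxFrom (fun l => PySem.Str.startswith (PySem.Str.strip l) ("## " ++ section_title)) lines 0 with
  | none => content ++ "\n\n## " ++ section_title ++ "\n" ++ link_line ++ "\n"
  | some s =>
    let e : Nat := (pvFindIdxFrom (fun l => PySem.Str.startswith (PySem.Str.strip l) "## ") (lines.drop (s + 1)) (s + 1)).getD lines.length
    if (PySem.List.slice lines (some (s : Int)) (some (e : Int))).any (fun line => PySem.Str.isIn link_line line)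
    then content
    else PySem.Str.join "\n" (PySem.List.insert lines (e : Int) link_line)

-- ===== PORT B =====
-- the block-building loop: `blocks`/`cur` of Source B (cur held apart, appended at the end)
def pvBlocksAux (don : List (List String)) (cur : List String) : List String → List (List String)
  | [] => don ++ [cur]
  | l :: ls =>
    if PySem.Str.startswith (PySem.Str.strip l) "## "
    then pvBlocksAux (don ++ [cur]) [l] ls
    else pvBlocksAux don (cur ++ [l]) ls

def pvHeadMatches (target : String) (b : List String) : Bool :=
  match b with
  | [] => false
  | x :: _ => PySem.Str.startswith (PySem.Str.strip x) target

-- the search-and-edit loop of Source B: none = no matching block; some none = duplicate found;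
-- some (some flat) = edited flattened line list
def pvEditBlocks (target link : String) : List (List String) → Option (Option (List String))
  | [] => none
  | b :: bs =>
    if pvHeadMatches target b then
      if b.any (fun ln => PySem.Str.isIn link ln)
      then some none
      else some (some (b ++ link :: bs.flatten))
    else (pvEditBlocks target link bs).map (Option.map (fun fl => b ++ fl))

def insert_link_into_section_py_alt (content : String) (section_title : String) (link_line : String) : String :=
  let lines := pvSplitLines content
  let blocks := pvBlocksAux [] [] lines
  match pvEditBlocks ("## " ++ section_title) link_line blocks with
  | none => content ++ "\n\n" ++ ("## " ++ section_title) ++ "\n" ++ link_line ++ "\n"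
  | some none => content
  | some (some flat) => PySem.Str.join "\n" flat

-- ===== PRECONDITION & SPEC =====
def Spec_insert_link_into_section_py (content : String) (section_title : String) (link_line : String) (out : String) : Prop := out = insert_link_into_section_py_alt content section_title link_line
instance (content : String) (section_title : String) (link_line : String) (out : String) : Decidable (Spec_insert_link_into_section_py content section_title link_line out) := by unfold Spec_insert_link_into_section_py; infer_instance

-- ===== CLAIM (what is proved, stated in full; the proofs are below) =====
def Claim_equal_insert_link_into_section_py : Prop := ∀ (content : String) (section_title : String) (link_line : String), Dom_insert_link_into_section_py content section_title link_line → Spec_insert_link_into_section_py content section_title link_line (insert_link_into_section_py content section_title link_line)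

-- ===== LEMMAS AND PROOFS =====

-- a line matching '## <title>' also matches '## '
theorem pvStartswith_mono (s t u : String) (h : PySem.Str.startswith s (t ++ u) = true) :
    PySem.Str.startswith s t = true := by
  simp only [PySem.Str.startswith_eq, String.toList_append] at h ⊢
  exact (PySem.Chars.startswith_iff _ _).mpr
    ((List.prefix_append _ _).trans ((PySem.Chars.startswith_iff _ _).mp h))

theorem pvFind_none (p : String → Bool) : ∀ (t : List String) (i : Nat),
    pvFindIdxFrom p t i = none → ∀ x ∈ t, p x = false := by
  intro t
  induction t with
  | nil => intro i _ x hx; cases hx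
  | cons l ls ih =>
    intro i h x hx
    by_cases hp : p l = true
    · simp [pvFindIdxFrom, hp] at h
    · rcases List.mem_cons.mp hx with rfl | hx
      · simpa using hp
      · exact ih (i + 1) (by simpa [pvFindIdxFrom, hp] using h) x hx

theorem pvFind_some (p : String → Bool) : ∀ (t : List String) (i s : Nat),
    pvFindIdxFrom p t i = some s →
    ∃ pre a u, t = pre ++ a :: u ∧ (∀ x ∈ pre, p x = false) ∧ p a = true ∧ s = i + pre.length := by
  intro t
  induction t with
  | nil => intro i s h; simp [pvFindIdxFrom] at h
  | cons l ls ih =>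
    intro i s h
    by_cases hp : p l = true
    · refine ⟨[], l, ls, by simp, by simp, hp, ?_⟩
      simp only [pvFindIdxFrom, if_pos hp, Option.some.injEq] at h
      simp [← h]
    · rcases ih (i + 1) s (by simpa [pvFindIdxFrom, hp] using h) with
        ⟨pre, a, u, ht, hpre, ha, hs⟩
      refine ⟨l :: pre, a, u, by simp [ht], ?_, ha, by simp only [List.length_cons]; omega⟩
      intro x hx
      rcases List.mem_cons.mp hx with rfl | hx
      · simpa using hp
      · exact hpre x hx

theorem pvBlocksAux_shift (ls : List String) : ∀ (don : List (List String)) (cur : List String),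
    pvBlocksAux don cur ls = don ++ pvBlocksAux [] cur ls := by
  induction ls with
  | nil => intro don cur; simp [pvBlocksAux]
  | cons l ls ih =>
    intro don cur
    by_cases h : PySem.Str.startswith (PySem.Str.strip l) "## " = true
    · simp only [pvBlocksAux, if_pos h]
      rw [ih (don ++ [cur]) [l], ih ([] ++ [cur]) [l]]
      simp
    · simp only [pvBlocksAux, if_neg h]
      exact ih don (cur ++ [l])

theorem pvBlocksAux_all_plain (ls : List String)
    (h : ∀ x ∈ ls, PySem.Str.startswith (PySem.Str.strip x) "## " = false) :
    ∀ (don : List (List String)) (cur : List String),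
    pvBlocksAux don cur ls = don ++ [cur ++ ls] := by
  induction ls with
  | nil => intro don cur; simp [pvBlocksAux]
  | cons l ls ih =>
    intro don cur
    have hl : PySem.Str.startswith (PySem.Str.strip l) "## " = false := h l (by simp)
    simp only [pvBlocksAux, Bool.eq_false_iff.mp hl, if_neg Bool.false_ne_true]
    rw [ih (fun x hx => h x (by simp [hx])) don (cur ++ [l])]
    simp

theorem pvBlocksAux_to_hdr (pre2 : List String) (b : String) (u2 : List String)
    (hpre2 : ∀ x ∈ pre2, PySem.Str.startswith (PySem.Str.strip x) "## " = false)
    (hb : PySem.Str.startswith (PySem.Str.strip b) "## " = true) :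
    ∀ (don : List (List String)) (cur : List String),
    pvBlocksAux don cur (pre2 ++ b :: u2) = pvBlocksAux (don ++ [cur ++ pre2]) [b] u2 := by
  induction pre2 with
  | nil => intro don cur; simp only [List.nil_append, pvBlocksAux, if_pos hb, List.append_nil]
  | cons x pre2 ih =>
    intro don cur
    have hx : PySem.Str.startswith (PySem.Str.strip x) "## " = false := hpre2 x (by simp)
    simp only [List.cons_append, pvBlocksAux, Bool.eq_false_iff.mp hx, if_neg Bool.false_ne_true]
    rw [ih (fun y hy => hpre2 y (by simp [hy])) don (cur ++ [x])]
    simp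

theorem pvBlocksAux_flatten (ls : List String) : ∀ (don : List (List String)) (cur : List String),
    (pvBlocksAux don cur ls).flatten = don.flatten ++ cur ++ ls := by
  induction ls with
  | nil => intro don cur; simp [pvBlocksAux]
  | cons l ls ih =>
    intro don cur
    by_cases h : PySem.Str.startswith (PySem.Str.strip l) "## " = true
    · simp only [pvBlocksAux, if_pos h]
      rw [ih (don ++ [cur]) [l]]
      simp
    · simp only [pvBlocksAux, if_neg h]
      rw [ih don (cur ++ [l])]
      simp

theorem pvHeadMatches_append (target : String) (cur : List String) (l : String)
    (hc : pvHeadMatches target cur = false)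
    (hl : PySem.Str.startswith (PySem.Str.strip l) target = false) :
    pvHeadMatches target (cur ++ [l]) = false := by
  cases cur with
  | nil => simpa [pvHeadMatches] using hl
  | cons x xs => simpa [pvHeadMatches] using hc

-- processing the lines before the matching header keeps the state invariant
theorem pvBlocksAux_pre (target : String) (pre : List String)
    (hpre : ∀ x ∈ pre, PySem.Str.startswith (PySem.Str.strip x) target = false) :
    ∀ (don : List (List String)) (cur : List String) (rest : List String),
    (∀ blk ∈ don, pvHeadMatches target blk = false) → pvHeadMatches target cur = false →
    ∃ D c, pvBlocksAux don cur (pre ++ rest) = pvBlocksAux D c rest ∧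
      (∀ blk ∈ D, pvHeadMatches target blk = false) ∧ pvHeadMatches target c = false ∧
      D.flatten ++ c = don.flatten ++ cur ++ pre := by
  induction pre with
  | nil =>
    intro don cur rest hdon hcur
    exact ⟨don, cur, by simp, hdon, hcur, by simp⟩
  | cons l pre ih =>
    intro don cur rest hdon hcur
    have hl : PySem.Str.startswith (PySem.Str.strip l) target = false := hpre l (by simp)
    have hpre' : ∀ x ∈ pre, PySem.Str.startswith (PySem.Str.strip x) target = false :=
      fun x hx => hpre x (by simp [hx])
    by_cases h : PySem.Str.startswith (PySem.Str.strip l) "## " = true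
    · rcases ih hpre' (don ++ [cur]) [l] rest
        (by intro blk hblk
            rcases List.mem_append.mp hblk with hb | hb
            · exact hdon blk hb
            · simp only [List.mem_singleton] at hb; subst hb; exact hcur)
        (by simpa [pvHeadMatches] using hl) with ⟨D, c, heq, hD, hc, hfl⟩
      refine ⟨D, c, ?_, hD, hc, ?_⟩
      · rw [List.cons_append]
        simp only [pvBlocksAux, if_pos h]
        exact heq
      · rw [hfl]; simp
    · rcases ih hpre' don (cur ++ [l]) rest hdon
        (pvHeadMatches_append target cur l hcur hl) with ⟨D, c, heq, hD, hc, hfl⟩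
      refine ⟨D, c, ?_, hD, hc, ?_⟩
      · rw [List.cons_append]
        simp only [pvBlocksAux, if_neg h]
        exact heq
      · rw [hfl]; simp

theorem pvEditBlocks_none (target link : String) : ∀ (bs : List (List String)),
    (∀ blk ∈ bs, pvHeadMatches target blk = false) → pvEditBlocks target link bs = none := by
  intro bs
  induction bs with
  | nil => intro _; rfl
  | cons b bs ih =>
    intro h
    have hb : pvHeadMatches target b = false := h b (by simp)
    simp only [pvEditBlocks, hb, if_neg Bool.false_ne_true]
    rw [ih (fun blk hblk => h blk (by simp [hblk]))]
    rfl

theorem pvEditBlocks_skip_found (target link : String) (ablk : List String)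
    (rest : List (List String)) (ha : pvHeadMatches target ablk = true) :
    ∀ (D : List (List String)), (∀ blk ∈ D, pvHeadMatches target blk = false) →
    pvEditBlocks target link (D ++ ablk :: rest) =
      (if ablk.any (fun ln => PySem.Str.isIn link ln)
       then some none
       else some (some (D.flatten ++ (ablk ++ link :: rest.flatten)))) := by
  intro D
  induction D with
  | nil =>
    intro _
    simp [pvEditBlocks, ha]
  | cons d D ih =>
    intro h
    have hd : pvHeadMatches target d = false := h d (by simp)
    simp only [List.cons_append, pvEditBlocks, hd, if_neg Bool.false_ne_true]
    rw [ih (fun blk hblk => h blk (by simp [hblk]))]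
    split_ifs <;> simp

-- ===== VERDICT (by name: the statement is the Claim_ definition above) =====
set_option maxHeartbeats 1000000 in
theorem insert_link_into_section_py_spec : Claim_equal_insert_link_into_section_py := by
  intro content section_title link_line _
  unfold Spec_insert_link_into_section_py insert_link_into_section_py insert_link_into_section_py_alt
  dsimp only
  set lines := pvSplitLines content with hlines
  cases hfind : pvFindIdxFrom
      (fun l => PySem.Str.startswith (PySem.Str.strip l) ("## " ++ section_title)) lines 0 with
  | none =>
    have hall : ∀ x ∈ lines,
        PySem.Str.startswith (PySem.Str.strip x) ("## " ++ section_title) = false :=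
      pvFind_none _ lines 0 hfind
    rcases pvBlocksAux_pre ("## " ++ section_title) lines hall [] [] []
        (by intro blk hblk; cases hblk) (by simp [pvHeadMatches]) with ⟨D, c, heq, hD, hc, _⟩
    have hnone : pvEditBlocks ("## " ++ section_title) link_line (pvBlocksAux [] [] lines) = none := by
      have heq' : pvBlocksAux [] [] lines = D ++ [c] := by simpa [pvBlocksAux] using heq
      rw [heq']
      refine pvEditBlocks_none _ _ _ ?_
      intro blk hblk
      rcases List.mem_append.mp hblk with hb | hb
      · exact hD blk hb
      · simp only [List.mem_singleton] at hb; subst hb; exact hc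
    rw [hnone]
    rw [show content ++ "\n\n" ++ ("## " ++ section_title) ++ "\n" ++ link_line ++ "\n"
          = content ++ ("\n\n" ++ ("## " ++ (section_title ++ ("\n" ++ (link_line ++ "\n"))))) by
        simp [String.append_assoc],
      show content ++ "\n\n## " ++ section_title ++ "\n" ++ link_line ++ "\n"
          = content ++ ("\n\n## " ++ (section_title ++ ("\n" ++ (link_line ++ "\n")))) by
        simp [String.append_assoc]]
    rw [show ("\n\n## " : String) = "\n\n" ++ "## " from rfl, String.append_assoc]
  | some s =>
    dsimp only
    rcases pvFind_some _ lines 0 s hfind with ⟨pre, a, u, ht, hpre, ha, hs⟩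
    have hslen : s = pre.length := by omega
    have hdra : PySem.Str.startswith (PySem.Str.strip a) "## " = true :=
      pvStartswith_mono _ "## " section_title ha
    -- B: blocks of the prefix, then the a-block
    rcases pvBlocksAux_pre ("## " ++ section_title) pre hpre [] [] (a :: u)
        (by intro blk hblk; cases hblk) (by simp [pvHeadMatches]) with ⟨D, c, heq, hD, hc, hfl⟩
    have hflp : D.flatten ++ c = pre := by simpa using hfl
    have heq1 : pvBlocksAux [] [] lines = pvBlocksAux (D ++ [c]) [a] u := by
      rw [ht, heq]
      simp only [pvBlocksAux, if_pos hdra]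
    have hDc : ∀ blk ∈ D ++ [c], pvHeadMatches ("## " ++ section_title) blk = false := by
      intro blk hblk
      rcases List.mem_append.mp hblk with hb | hb
      · exact hD blk hb
      · simp only [List.mem_singleton] at hb; subst hb; exact hc
    have hDcf : (D ++ [c]).flatten = pre := by
      simp only [List.flatten_append, List.flatten_cons, List.flatten_nil, List.append_nil]
      exact hflp
    -- A: the tail searched for the closing header is u
    have hdrop1 : lines.drop (s + 1) = u := by
      rw [ht, hslen, show pre ++ a :: u = (pre ++ [a]) ++ u by simp,
        show pre.length + 1 = (pre ++ [a]).length by simp]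
      exact List.drop_left
    have hlen : lines.length = pre.length + 1 + u.length := by
      simp only [ht, List.length_append, List.length_cons]; omega
    rw [hdrop1]
    cases hend : pvFindIdxFrom
        (fun l => PySem.Str.startswith (PySem.Str.strip l) "## ") u (s + 1) with
    | none =>
      have hallu : ∀ x ∈ u, PySem.Str.startswith (PySem.Str.strip x) "## " = false :=
        pvFind_none _ u (s + 1) hend
      -- A's slice is the whole section a :: u
      have hslice : PySem.List.slice lines (some (s : Int)) (some ((lines.length : Nat) : Int))
          = a :: u := by
        rw [PySem.List.slice_natCast, ht, hslen]
        have hd : (pre ++ a :: u).drop pre.length = a :: u := List.drop_left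
        rw [hd]
        apply List.take_of_length_le
        simp only [List.length_cons, List.length_append]
        omega
      -- B's blocks end with the single block a :: u
      have hedit : pvEditBlocks ("## " ++ section_title) link_line (pvBlocksAux [] [] lines)
          = (if (a :: u).any (fun ln => PySem.Str.isIn link_line ln)
             then some none
             else some (some (pre ++ ((a :: u) ++ link_line :: ([] : List (List String)).flatten)))) := by
        rw [heq1, pvBlocksAux_all_plain u hallu (D ++ [c]) [a],
          show (D ++ [c]) ++ [[a] ++ u] = (D ++ [c]) ++ (a :: u) :: [] by simp,
          pvEditBlocks_skip_found ("## " ++ section_title) link_line (a :: u) []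
            (by simpa [pvHeadMatches] using ha) (D ++ [c]) hDc, hDcf]
      rw [hedit]
      simp only [Option.getD_none, List.flatten_nil]
      rw [hslice]
      by_cases hdup : (a :: u).any (fun line => PySem.Str.isIn link_line line) = true
      · rw [if_pos hdup, if_pos hdup]
      · rw [if_neg hdup, if_neg hdup]
        have hins : PySem.List.insert lines ((lines.length : Nat) : Int) link_line
            = lines ++ [link_line] := by
          rw [PySem.List.insert_natCast lines lines.length link_line (le_refl _)]
          simp
        rw [hins, ht]
        congr 1
        simp
    | some j =>
      rcases pvFind_some _ u (s + 1) j hend with ⟨pre2, b, u2, hu, hpre2, hb, hj⟩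
      have hjlen : j = s + 1 + pre2.length := by omega
      have hjle : j ≤ lines.length := by
        have : u.length = pre2.length + 1 + u2.length := by
          simp only [hu, List.length_append, List.length_cons]; omega
        omega
      -- A's slice is a :: pre2
      have hslice : PySem.List.slice lines (some (s : Int)) (some (j : Int)) = a :: pre2 := by
        rw [PySem.List.slice_natCast, ht, hslen]
        have hd : (pre ++ a :: u).drop pre.length = a :: u := List.drop_left
        rw [hd, hu, show j - pre.length = pre2.length + 1 by omega, List.take_succ_cons]
        congr 1
        exact List.take_left
      -- B's blocks: prefix blocks, the a-block a :: pre2, then the blocks of b :: u2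
      have hedit : pvEditBlocks ("## " ++ section_title) link_line (pvBlocksAux [] [] lines)
          = (if (a :: pre2).any (fun ln => PySem.Str.isIn link_line ln)
             then some none
             else some (some (pre ++ ((a :: pre2) ++ link_line :: (pvBlocksAux [] [b] u2).flatten)))) := by
        rw [heq1, hu, pvBlocksAux_to_hdr pre2 b u2 hpre2 (by simpa using hb) (D ++ [c]) [a],
          pvBlocksAux_shift u2 ((D ++ [c]) ++ [[a] ++ pre2]) [b],
          show ((D ++ [c]) ++ [[a] ++ pre2]) ++ pvBlocksAux [] [b] u2
              = (D ++ [c]) ++ (a :: pre2) :: pvBlocksAux [] [b] u2 by simp,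
          pvEditBlocks_skip_found ("## " ++ section_title) link_line (a :: pre2)
            (pvBlocksAux [] [b] u2) (by simpa [pvHeadMatches] using ha) (D ++ [c]) hDc, hDcf]
      rw [hedit]
      simp only [Option.getD_some]
      rw [hslice]
      by_cases hdup : (a :: pre2).any (fun line => PySem.Str.isIn link_line line) = true
      · rw [if_pos hdup, if_pos hdup]
      · rw [if_neg hdup, if_neg hdup]
        have hins : PySem.List.insert lines ((j : Nat) : Int) link_line
            = (pre ++ a :: pre2) ++ link_line :: (b :: u2) := by
          rw [PySem.List.insert_natCast lines j link_line hjle, ht, hu,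
            show pre ++ a :: (pre2 ++ b :: u2) = (pre ++ a :: pre2) ++ b :: u2 by simp,
            show j = (pre ++ a :: pre2).length by simp; omega]
          rw [List.take_left, List.drop_left]
        rw [hins, pvBlocksAux_flatten u2 [] [b]]
        congr 1
        simp
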